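-- pv_equiv track=rewrite | github.com/adhityaf/CodewarsChallenge | Python/Kyu7/barista_problem.py | barista
-- ===== SOURCE A (Python) =====
-- def barista(coffees):
--     totalTime = 0
--     time_list = []
--     for ind, num in enumerate(sorted(coffees, reverse=False)):
--         if ind == 0:
--             totalTime += num
--             time_list.append(totalTime)
--         else:
--             totalTime += num + 2
--             time_list.append(totalTime)
--
--     return sum(time_list)
-- ===== SOURCE B (Python) =====
-- def barista(coffees):
--     n = len(coffees)
--     total = 0
--     for i, val in enumerate(sorted(coffees)):
--         total += (n - i) * val
--     return total + n * (n - 1)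
-- ===== Notes on version B (the rewrite author's own statement) =====
-- stated objective: simpler
-- what changed: Replaces the running-cumulative-total plus intermediate time_list (summed afterwards) by a single weighted sum: each sorted value contributes (n-i) times, and the +2-per-step offsets collapse to the closed constant n*(n-1).
import Mathlib
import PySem

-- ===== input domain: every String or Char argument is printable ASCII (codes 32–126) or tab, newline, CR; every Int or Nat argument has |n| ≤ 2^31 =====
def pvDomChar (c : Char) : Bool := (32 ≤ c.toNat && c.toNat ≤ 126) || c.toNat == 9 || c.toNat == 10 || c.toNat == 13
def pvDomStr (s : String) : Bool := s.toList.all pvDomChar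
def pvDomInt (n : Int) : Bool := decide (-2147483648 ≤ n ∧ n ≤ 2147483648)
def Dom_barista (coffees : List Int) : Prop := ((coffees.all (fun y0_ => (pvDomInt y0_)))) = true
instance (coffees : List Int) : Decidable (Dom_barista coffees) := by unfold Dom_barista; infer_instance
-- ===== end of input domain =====

-- B: single weighted-sum pass over the sorted list (each value counted (n-i) times) plus the constant n*(n-1), instead of A's running total and intermediate list; simpler, no intermediate list.
-- ===== PORT A =====
def barista (coffees : List Int) : Int :=
  let init : Int × List Int := (0, [])
  let st :=
    (PySem.List.enumerate (PySem.List.sorted coffees (fun x => x) false) 0).foldl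
      (fun (st : Int × List Int) (p : Int × Int) =>
        if p.1 == 0 then
          (st.1 + p.2, st.2 ++ [st.1 + p.2])
        else
          (st.1 + p.2 + 2, st.2 ++ [st.1 + p.2 + 2]))
      init
  st.2.sum

-- ===== PORT B =====
def barista_alt (coffees : List Int) : Int :=
  let n : Int := coffees.length
  let total :=
    (PySem.List.enumerate (PySem.List.sorted coffees (fun x => x) false) 0).foldl
      (fun (acc : Int) (p : Int × Int) => acc + (n - p.1) * p.2) 0
  total + n * (n - 1)

-- ===== PRECONDITION & SPEC =====
def Spec_barista (coffees : List Int) (out : Int) : Prop := out = barista_alt coffees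
instance (coffees : List Int) (out : Int) : Decidable (Spec_barista coffees out) := by unfold Spec_barista; infer_instance

-- ===== CLAIM (what is proved, stated in full; the proofs are below) =====
def Claim_equal_barista : Prop := ∀ (coffees : List Int), Dom_barista coffees → Spec_barista coffees (barista coffees)

-- ===== LEMMAS AND PROOFS =====

def Astep (st : Int × List Int) (p : Int × Int) : Int × List Int :=
  if p.1 == 0 then
    (st.1 + p.2, st.2 ++ [st.1 + p.2])
  else
    (st.1 + p.2 + 2, st.2 ++ [st.1 + p.2 + 2])

theorem barista_eq_Astep (coffees : List Int) :
    barista coffees =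
      ((PySem.List.enumerate (PySem.List.sorted coffees (fun x => x) false) 0).foldl
        Astep ((0 : Int), ([] : List Int))).2.sum := rfl

-- raising the weight base n by 1 adds the plain sum of the values
theorem wshift (l : List Int) (n : Int) : ∀ s : Int,
    ((PySem.List.enumerate l s).map (fun p => (n + 1 - p.1) * p.2)).sum =
      ((PySem.List.enumerate l s).map (fun p => (n - p.1) * p.2)).sum + l.sum := by
  induction l with
  | nil => intro s; simp
  | cons x xs ih =>
    intro s
    simp only [PySem.List.enumerate_cons, List.map_cons, List.sum_cons, List.sum_cons, ih (s + 1)]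
    ring

-- loop invariant for A's fold: the running total and the sum of time_list, in closed form
theorem Ainv (l : List Int) :
    (l = [] ∨
      ((PySem.List.enumerate l 0).foldl Astep ((0 : Int), ([] : List Int))).1 =
        l.sum + 2 * ((l.length : Int) - 1)) ∧
    ((PySem.List.enumerate l 0).foldl Astep ((0 : Int), ([] : List Int))).2.sum =
      ((PySem.List.enumerate l 0).map (fun p => ((l.length : Int) - p.1) * p.2)).sum +
        (l.length : Int) * ((l.length : Int) - 1) := by
  induction l using List.reverseRecOn with
  | nil => simp
  | append_singleton l x ih =>
    rcases ih with ⟨ih1, ih2⟩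
    have henum : PySem.List.enumerate (l ++ [x]) 0 =
        PySem.List.enumerate l 0 ++ [((l.length : Int), x)] := by
      rw [PySem.List.enumerate_append]
      simp [PySem.List.enumerate_cons]
    rcases eq_or_ne l [] with h | h
    · subst h
      constructor
      · right; simp [Astep]
      · simp [Astep]
    · have hm : (1 : Int) ≤ (l.length : Int) := by
        have := List.length_pos_iff.mpr h; exact_mod_cast this
      have hbeq : (((l.length : Int)) == 0) = false := by
        simp; omega
      have ht := ih1.resolve_left h
      rw [henum, List.foldl_append]
      simp only [List.foldl_cons, List.foldl_nil]
      constructor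
      · right
        simp [Astep, hbeq, ht]
        ring
      · have hA : Astep ((PySem.List.enumerate l 0).foldl Astep ((0 : Int), ([] : List Int)))
            ((l.length : Int), x) =
            (((PySem.List.enumerate l 0).foldl Astep ((0 : Int), ([] : List Int))).1 + x + 2,
             ((PySem.List.enumerate l 0).foldl Astep ((0 : Int), ([] : List Int))).2 ++
               [((PySem.List.enumerate l 0).foldl Astep ((0 : Int), ([] : List Int))).1 + x + 2]) := by
          simp [Astep, hbeq]
        rw [hA]
        have hw := wshift l (l.length : Int) 0
        simp only [List.sum_append, List.sum_cons, List.sum_nil, List.map_append, List.map_cons,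
          List.map_nil, List.length_append, List.length_cons, List.length_nil, add_zero]
        push_cast
        push_cast at hw
        rw [ih2, ht, hw]
        ring

-- ===== VERDICT (by name: the statement is the Claim_ definition above) =====
theorem barista_spec : Claim_equal_barista := by
  intro coffees _
  unfold Spec_barista barista_alt
  rw [barista_eq_Astep]
  have h := (Ainv (PySem.List.sorted coffees (fun x => x) false)).2
  rw [h]
  simp only [PySem.List.foldl_add, PySem.List.length_sorted, zero_add]
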